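-- pv_equiv track=rewrite | github.com/FraterCCCLXIII/messiahcomplex | scripts/clean_csv.py | trim_cols
-- ===== SOURCE A (Python) =====
-- def trim_cols(rows: list[list[str]]) -> list[list[str]]:
--     """Remove trailing columns that are empty in every row."""
--     if not rows:
--         return rows
--     max_cols = max(len(r) for r in rows)
--     last_used = 0
--     for r in rows:
--         for i, cell in enumerate(r):
--             if cell.strip():
--                 last_used = max(last_used, i)
--     width = last_used + 1
--     return [r[:width] + [""] * max(0, width - len(r)) for r in rows]
-- ===== SOURCE B (Python) =====
-- def trim_cols(rows: list[list[str]]) -> list[list[str]]: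
--     """Remove trailing columns that are empty in every row."""
--     if not rows:
--         return rows
--     max_cols = max(len(r) for r in rows)
--     last_used = 0
--     for j in range(max_cols - 1, 0, -1):
--         if any(j < len(r) and r[j].strip() for r in rows):
--             last_used = j
--             break
--     width = last_used + 1
--     return [r[:width] + [""] * (width - len(r)) for r in rows]
-- ===== Notes on version B (the rewrite author's own statement) =====
-- stated objective: faster
-- what changed: Replaces A's full row-major nested max-tracking scan over every cell with a column-major right-to-left search that stops at the first column containing a non-empty cell.
import Mathlib
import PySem

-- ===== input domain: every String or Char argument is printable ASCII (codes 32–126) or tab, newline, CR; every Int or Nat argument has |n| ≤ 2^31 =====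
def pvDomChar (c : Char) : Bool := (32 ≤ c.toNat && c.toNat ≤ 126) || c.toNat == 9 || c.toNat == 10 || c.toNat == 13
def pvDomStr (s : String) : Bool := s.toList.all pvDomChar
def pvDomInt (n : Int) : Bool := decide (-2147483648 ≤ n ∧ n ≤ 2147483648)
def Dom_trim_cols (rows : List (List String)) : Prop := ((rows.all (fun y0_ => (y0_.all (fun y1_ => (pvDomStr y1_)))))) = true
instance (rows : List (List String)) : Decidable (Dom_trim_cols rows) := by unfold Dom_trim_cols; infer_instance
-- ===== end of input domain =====

-- B replaces A's row-major full scan with a column-major right-to-left early-exit search for the last used column (objective: faster; constant-factor early exit, measured).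

-- ===== PORT A =====
def trim_cols (rows : List (List String)) : List (List String) :=
  if rows = [] then rows
  else
    let _max_cols := PySem.List.max? (rows.map (fun r => (r.length : Int))) (fun x => x)
    let last_used : Int := rows.foldl (fun acc r =>
      (PySem.List.enumerate r 0).foldl (fun acc2 p =>
        if PySem.Str.strip p.2 ≠ "" then max acc2 p.1 else acc2) acc) 0
    let width := last_used + 1
    rows.map (fun r =>
      PySem.List.slice r none (some width) ++ List.replicate (max 0 (width - (r.length : Int))).toNat "")

-- ===== PORT B =====
-- 'any(j < len(r) and r[j].strip() for r in rows)'
def pvColUsed (rows : List (List String)) (j : Nat) : Bool :=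
  rows.any (fun r => decide (j < r.length) && decide (PySem.Str.strip (r.getD j "") ≠ ""))

-- 'for j in range(max_cols - 1, 0, -1): … break' — first j (from n down to 1) whose column is used, else 0
def pvFindLast (rows : List (List String)) : Nat → Nat
  | 0 => 0
  | j+1 => if pvColUsed rows (j+1) then j+1 else pvFindLast rows j

def trim_cols_alt (rows : List (List String)) : List (List String) :=
  if rows = [] then rows
  else
    let maxCols := rows.foldl (fun m r => max m r.length) 0
    let width := pvFindLast rows (maxCols - 1) + 1
    rows.map (fun r => r.take width ++ List.replicate (width - r.length) "")

-- ===== PRECONDITION & SPEC =====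
def Spec_trim_cols (rows : List (List String)) (out : List (List String)) : Prop := out = trim_cols_alt rows
instance (rows : List (List String)) (out : List (List String)) : Decidable (Spec_trim_cols rows out) := by unfold Spec_trim_cols; infer_instance

-- ===== CLAIM (what is proved, stated in full; the proofs are below) =====
def Claim_equal_trim_cols : Prop := ∀ (rows : List (List String)), Dom_trim_cols rows → Spec_trim_cols rows (trim_cols rows)

-- ===== LEMMAS AND PROOFS =====

-- indices of the used (non-blank after strip) cells of a row
def pvUsedIdx (r : List String) : List Int :=
  ((PySem.List.enumerate r 0).filter (fun p => PySem.Str.strip p.2 ≠ "")).map (·.1)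

theorem pvInner_eq_foldl_max (l : List (Int × String)) (a : Int) :
    l.foldl (fun acc2 p => if PySem.Str.strip p.2 ≠ "" then max acc2 p.1 else acc2) a
      = ((l.filter (fun p => PySem.Str.strip p.2 ≠ "")).map (·.1)).foldl max a := by
  induction l generalizing a with
  | nil => rfl
  | cons x t ih =>
    by_cases h : PySem.Str.strip x.2 ≠ ""
    · rw [List.foldl_cons, if_pos h,
        show List.filter (fun p => decide (PySem.Str.strip p.2 ≠ "")) (x :: t)
            = x :: List.filter (fun p => decide (PySem.Str.strip p.2 ≠ "")) t from by
          simp [h],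
        List.map_cons, List.foldl_cons]
      exact ih (max a x.1)
    · rw [List.foldl_cons, if_neg h,
        show List.filter (fun p => decide (PySem.Str.strip p.2 ≠ "")) (x :: t)
            = List.filter (fun p => decide (PySem.Str.strip p.2 ≠ "")) t from by
          simp [h]]
      exact ih a

theorem pvOuter_eq_foldl_max (rows : List (List String)) (a : Int) :
    rows.foldl (fun acc r =>
      (PySem.List.enumerate r 0).foldl (fun acc2 p =>
        if PySem.Str.strip p.2 ≠ "" then max acc2 p.1 else acc2) acc) a
      = (rows.flatMap pvUsedIdx).foldl max a := by
  induction rows generalizing a with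
  | nil => rfl
  | cons r t ih =>
    simp only [List.foldl, List.flatMap_cons, List.foldl_append]
    rw [pvInner_eq_foldl_max, ih]
    rfl

theorem pvFoldl_max_mem_or (L : List Int) (a : Int) :
    L.foldl max a = a ∨ L.foldl max a ∈ L := by
  induction L generalizing a with
  | nil => left; rfl
  | cons x t ih =>
    rcases ih (max a x) with h | h
    · simp only [List.foldl] at *
      rw [h]
      rcases max_choice a x with h' | h'
      · left; exact h'
      · right; rw [h']; simp
    · right; simp [List.foldl, h]

theorem pvLe_foldl_max (L : List Int) (a : Int) : a ≤ L.foldl max a := by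
  induction L generalizing a with
  | nil => simp [List.foldl]
  | cons x t ih => exact le_trans (le_max_left a x) (ih (max a x))

theorem pvMem_le_foldl_max (L : List Int) (a x : Int) (hx : x ∈ L) : x ≤ L.foldl max a := by
  induction L generalizing a with
  | nil => cases hx
  | cons y t ih =>
    rcases List.mem_cons.mp hx with rfl | h
    · exact le_trans (le_max_right a x) (pvLe_foldl_max t _)
    · exact ih _ h

theorem pvMem_usedL (rows : List (List String)) (x : Int) :
    x ∈ rows.flatMap pvUsedIdx ↔
      ∃ k : Nat, x = (k : Int) ∧ pvColUsed rows k = true := by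
  constructor
  · intro hx
    rcases List.mem_flatMap.mp hx with ⟨r, hr, hxr⟩
    rcases List.mem_map.mp hxr with ⟨p, hp, hpx⟩
    rcases List.mem_filter.mp hp with ⟨hpe, hps⟩
    rcases (PySem.List.mem_enumerate_iff r 0 p).mp hpe with ⟨k, hk, hpk⟩
    subst hpk
    refine ⟨k, by simpa using hpx.symm, ?_⟩
    simp only [pvColUsed, List.any_eq_true]
    refine ⟨r, hr, ?_⟩
    have : r.getD k "" = r[k] := List.getD_eq_getElem r "" hk
    simp only [this, hk]
    simpa using of_decide_eq_true hps
  · rintro ⟨k, rfl, hu⟩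
    simp only [pvColUsed, List.any_eq_true] at hu
    rcases hu with ⟨r, hr, hcond⟩
    simp only [Bool.and_eq_true] at hcond
    rcases hcond with ⟨h1, h2⟩
    have hk : k < r.length := of_decide_eq_true h1
    refine List.mem_flatMap.mpr ⟨r, hr, ?_⟩
    refine List.mem_map.mpr ⟨((k : Int), r[k]), ?_, rfl⟩
    refine List.mem_filter.mpr ⟨?_, ?_⟩
    · exact (PySem.List.mem_enumerate_iff r 0 _).mpr ⟨k, hk, by simp⟩
    · have : r.getD k "" = r[k] := List.getD_eq_getElem r "" hk
      rw [this] at h2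
      simpa using of_decide_eq_true h2

theorem pvFindLast_spec (rows : List (List String)) (n : Nat) :
    pvFindLast rows n = 0 ∨ pvColUsed rows (pvFindLast rows n) = true := by
  induction n with
  | zero => left; rfl
  | succ m ih =>
    simp only [pvFindLast]
    split
    · right; assumption
    · exact ih

theorem pvFindLast_ge (rows : List (List String)) (n j : Nat)
    (hj : j ≤ n) (hu : pvColUsed rows j = true) : j ≤ pvFindLast rows n := by
  induction n with
  | zero => omega
  | succ m ih =>
    simp only [pvFindLast]
    split
    · exact hj
    · rename_i hnot
      have : j ≠ m + 1 := by rintro rfl; exact hnot hu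
      exact ih (by omega)

theorem pvLe_foldl_maxlen (t : List (List String)) (a : Nat) :
    a ≤ t.foldl (fun m r => max m r.length) a := by
  induction t generalizing a with
  | nil => exact le_refl a
  | cons z u ih => exact le_trans (le_max_left _ _) (ih _)

theorem pvLen_le_maxCols (rows : List (List String)) (r : List String) (hr : r ∈ rows) (a : Nat) :
    r.length ≤ rows.foldl (fun m r => max m r.length) a := by
  induction rows generalizing a with
  | nil => cases hr
  | cons y t ih =>
    rcases List.mem_cons.mp hr with rfl | h
    · exact le_trans (le_max_right a r.length) (pvLe_foldl_maxlen t _)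
    · exact ih h _

-- A's loop result equals B's column search result
theorem pvLastUsed_eq (rows : List (List String)) :
    rows.foldl (fun acc r =>
      (PySem.List.enumerate r 0).foldl (fun acc2 p =>
        if PySem.Str.strip p.2 ≠ "" then max acc2 p.1 else acc2) acc) 0
    = ((pvFindLast rows ((rows.foldl (fun m r => max m r.length) 0) - 1) : Nat) : Int) := by
  rw [pvOuter_eq_foldl_max]
  set L := rows.flatMap pvUsedIdx with hL
  set n := (rows.foldl (fun m r => max m r.length) 0) - 1 with hn
  set B := pvFindLast rows n with hB
  have hA_nonneg : (0 : Int) ≤ L.foldl max 0 := pvLe_foldl_max L 0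
  -- every used column index is ≤ n
  have hbound : ∀ k : Nat, pvColUsed rows k = true → k ≤ n := by
    intro k hk
    simp only [pvColUsed, List.any_eq_true] at hk
    rcases hk with ⟨r, hr, hc⟩
    simp only [Bool.and_eq_true] at hc
    have h1' : k < r.length := of_decide_eq_true hc.1
    have := pvLen_le_maxCols rows r hr 0
    omega
  apply le_antisymm
  · rcases pvFoldl_max_mem_or L 0 with h | h
    · rw [h]; exact Int.natCast_nonneg _
    · rcases (pvMem_usedL rows _).mp h with ⟨k, hk, hu⟩
      rw [hk]
      exact_mod_cast pvFindLast_ge rows n k (hbound k hu) hu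
  · rcases pvFindLast_spec rows n with h | h
    · rw [hB, h]; exact_mod_cast hA_nonneg
    · exact pvMem_le_foldl_max L 0 _ ((pvMem_usedL rows _).mpr ⟨B, rfl, h⟩)

theorem pvRow_eq (r : List String) (w : Nat) :
    PySem.List.slice r none (some ((w : Nat) : Int)) ++
        List.replicate (max 0 (((w : Nat) : Int) - (r.length : Int))).toNat ""
      = r.take w ++ List.replicate (w - r.length) "" := by
  rw [PySem.List.slice_to_natCast]
  congr 1
  congr 1
  omega

-- ===== VERDICT (by name: the statement is the Claim_ definition above) =====
theorem trim_cols_spec : Claim_equal_trim_cols := by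
  intro rows _
  unfold Spec_trim_cols trim_cols trim_cols_alt
  by_cases h : rows = []
  · simp [h]
  · simp only [if_neg h]
    apply List.map_congr_left
    intro r _
    have := pvLastUsed_eq rows
    rw [this]
    have : ((pvFindLast rows ((rows.foldl (fun m r => max m r.length) 0) - 1) : Nat) : Int) + 1
        = (((pvFindLast rows ((rows.foldl (fun m r => max m r.length) 0) - 1) + 1 : Nat)) : Int) := by
      push_cast; ring
    rw [this]
    exact pvRow_eq r _
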